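-- pv_equiv track=rewrite | github.com/TCTri205/video-summary | docs/Reasoning-NLP/schema/validate_artifacts.py | check_unique_segment_ids
-- ===== SOURCE A (Python) =====
-- from typing import Any, Dict, List, Tuple
--
-- def check_unique_segment_ids(items: List[Dict[str, Any]], field: str, label: str) -> List[str]:
--     seen = set()
--     errors = []
--     for i, item in enumerate(items):
--         val = item.get(field)
--         if val in seen:
--             errors.append(f"[{label}] duplicate {field}={val} at index {i}")
--         seen.add(val)
--     return errors
-- ===== SOURCE B (Python) =====
-- def check_unique_segment_ids(items, field, label):
--     first = {}
--     for i, item in enumerate(items):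
--         first.setdefault(item.get(field), i)
--     return [
--         f"[{label}] duplicate {field}={item.get(field)} at index {i}"
--         for i, item in enumerate(items)
--         if first.get(item.get(field)) != i
--     ]
-- ===== Notes on version B (the rewrite author's own statement) =====
-- stated objective: alternative
-- what changed: Replaces the single-pass scan with a growing 'seen' set by a two-pass scheme: first build a first-occurrence-index map with setdefault, then emit an error for every index that is not its value's first occurrence, via a comprehension.
import Mathlib
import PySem

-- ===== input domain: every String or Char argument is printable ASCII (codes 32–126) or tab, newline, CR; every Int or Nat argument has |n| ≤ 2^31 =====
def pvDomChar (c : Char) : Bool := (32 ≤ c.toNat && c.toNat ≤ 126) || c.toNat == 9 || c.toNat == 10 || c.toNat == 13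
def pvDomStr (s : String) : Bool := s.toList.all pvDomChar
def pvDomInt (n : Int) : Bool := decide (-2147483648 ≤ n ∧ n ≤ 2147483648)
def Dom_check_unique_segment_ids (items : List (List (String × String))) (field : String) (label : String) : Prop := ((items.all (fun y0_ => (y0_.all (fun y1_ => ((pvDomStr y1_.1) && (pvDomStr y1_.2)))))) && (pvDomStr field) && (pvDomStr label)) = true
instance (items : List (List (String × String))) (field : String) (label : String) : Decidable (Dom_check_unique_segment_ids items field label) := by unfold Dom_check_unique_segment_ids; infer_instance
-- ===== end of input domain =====

-- B builds a first-occurrence-index map and then filters the enumeration, instead of A's single pass with a growing 'seen' set; return values proved equal on all inputs.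

-- shared formatting/lookup helpers (both Pythons use the identical f-string and item.get(field))
def pvMsg (field label : String) (v : Option String) (i : Int) : String :=
  "[" ++ label ++ "] duplicate " ++ field ++ "=" ++ (match v with | some s => s | none => "None") ++ " at index " ++ PySem.Int.toStr i

def pvVal (field : String) (item : List (String × String)) : Option String :=
  (PySem.Dict.mk item).get? field

-- ===== PORT A =====
def check_unique_segment_ids (items : List (List (String × String))) (field : String) (label : String) : List String :=
  ((PySem.List.enumerate items 0).foldl
    (fun (st : PySem.Set (Option String) × List String) p =>
      let val := pvVal field p.2
      let errors := if PySem.Set.contains st.1 val then st.2 ++ [pvMsg field label val p.1] else st.2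
      (PySem.Set.add st.1 val, errors))
    (PySem.Set.empty, [])).2

-- ===== PORT B =====
def check_unique_segment_ids_alt (items : List (List (String × String))) (field : String) (label : String) : List String :=
  let first := (PySem.List.enumerate items 0).foldl
      (fun (d : PySem.Dict (Option String) Int) p => d.setdefault (pvVal field p.2) p.1)
      PySem.Dict.empty
  ((PySem.List.enumerate items 0).filter
      (fun p => first.get? (pvVal field p.2) != some p.1)).map
    (fun p => pvMsg field label (pvVal field p.2) p.1)

-- ===== PRECONDITION & SPEC =====
def Spec_check_unique_segment_ids (items : List (List (String × String))) (field : String) (label : String) (out : List String) : Prop := out = check_unique_segment_ids_alt items field label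
instance (items : List (List (String × String))) (field : String) (label : String) (out : List String) : Decidable (Spec_check_unique_segment_ids items field label out) := by unfold Spec_check_unique_segment_ids; infer_instance

-- ===== CLAIM (what is proved, stated in full; the proofs are below) =====
def Claim_equal_check_unique_segment_ids : Prop := ∀ (items : List (List (String × String))) (field : String) (label : String), Dom_check_unique_segment_ids items field label → Spec_check_unique_segment_ids items field label (check_unique_segment_ids items field label)

-- ===== LEMMAS AND PROOFS =====

-- reference recursion: the duplicate messages of the suffix, given the values already seen
def pvRef (field label : String) : List (List (String × String)) → Int → List (Option String) → List String
  | [], _, _ => []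
  | it :: its, i, prev =>
    (if pvVal field it ∈ prev then [pvMsg field label (pvVal field it) i] else []) ++
      pvRef field label its (i + 1) (prev ++ [pvVal field it])

-- index of the first item whose field value is v, counting from i
def pvFidx (field : String) : List (List (String × String)) → Int → Option String → Option Int
  | [], _, _ => none
  | it :: its, i, v => if pvVal field it = v then some i else pvFidx field its (i + 1) v

lemma pvOfList_append_singleton {α : Type} [BEq α] (xs : List α) (v : α) :
    PySem.Set.ofList (xs ++ [v]) = PySem.Set.add (PySem.Set.ofList xs) v := by
  simp [PySem.Set.ofList_eq_foldl, List.foldl_append]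

lemma pvA_aux (field label : String) (its : List (List (String × String)))
    (i0 : Int) (prev : List (Option String)) (e : List String) :
    ((PySem.List.enumerate its i0).foldl
      (fun (st : PySem.Set (Option String) × List String) p =>
        (PySem.Set.add st.1 (pvVal field p.2),
         if PySem.Set.contains st.1 (pvVal field p.2) then
           st.2 ++ [pvMsg field label (pvVal field p.2) p.1] else st.2))
      (PySem.Set.ofList prev, e)).2 = e ++ pvRef field label its i0 prev := by
  induction its generalizing i0 prev e with
  | nil => simp [pvRef]
  | cons it its ih =>
    rw [PySem.List.enumerate_cons]
    simp only [List.foldl_cons]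
    rw [← pvOfList_append_singleton]
    rw [ih]
    by_cases h : pvVal field it ∈ prev
    · simp [pvRef, h, PySem.Set.contains, PySem.Set.mem_ofList]
    · simp [pvRef, h, PySem.Set.contains, PySem.Set.mem_ofList]

lemma pvD_aux (field : String) (its : List (List (String × String)))
    (i0 : Int) (d : PySem.Dict (Option String) Int) (v : Option String) :
    ((PySem.List.enumerate its i0).foldl
      (fun (d : PySem.Dict (Option String) Int) p => d.setdefault (pvVal field p.2) p.1) d).get? v
    = (d.get? v).or (pvFidx field its i0 v) := by
  induction its generalizing i0 d with
  | nil => simp [pvFidx]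
  | cons it its ih =>
    rw [PySem.List.enumerate_cons]
    simp only [List.foldl_cons]
    rw [ih]
    by_cases h : pvVal field it = v
    · subst h
      rw [PySem.Dict.get?_setdefault_self]
      cases hd : d.get? (pvVal field it) with
      | none => simp [pvFidx]
      | some x => simp [pvFidx]
    · rw [PySem.Dict.get?_setdefault_of_ne d i0 (Ne.symm h)]
      simp [pvFidx, h]

lemma pvFidx_spec (field : String) (its : List (List (String × String)))
    (i0 : Int) (k : Nat) (hk : k < its.length) :
    (pvFidx field its i0 (pvVal field its[k]) = some (i0 + k)) ↔
      pvVal field its[k] ∉ (its.take k).map (pvVal field) := by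
  induction its generalizing i0 k with
  | nil => simp at hk
  | cons it its ih =>
    cases k with
    | zero => simp [pvFidx]
    | succ k =>
      have hk' : k < its.length := by simpa using hk
      simp only [List.getElem_cons_succ, List.take_succ_cons, List.map_cons, List.mem_cons]
      by_cases h : pvVal field it = pvVal field its[k]
      · simp only [pvFidx, if_pos h]
        constructor
        · intro he
          simp only [Option.some.injEq] at he
          omega
        · intro hmem; exact absurd (Or.inl h.symm) hmem
      · simp only [pvFidx, if_neg h]
        have : (i0 + ((k : Nat) + 1 : Nat) : Int) = (i0 + 1) + (k : Nat) := by push_cast; ring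
        rw [this, ih (i0 + 1) k hk']
        constructor
        · intro hnm hc; rcases hc with hc | hc
          · exact h hc.symm
          · exact hnm hc
        · intro hnm hc; exact hnm (Or.inr hc)

lemma pvB_aux (field label : String) (its : List (List (String × String)))
    (i0 : Int) (prev : List (Option String)) (F : PySem.Dict (Option String) Int)
    (H : ∀ (k : Nat) (hk : k < its.length),
      (F.get? (pvVal field its[k]) ≠ some (i0 + k)) ↔
        pvVal field its[k] ∈ prev ++ (its.take k).map (pvVal field)) :
    ((PySem.List.enumerate its i0).filter
        (fun p => F.get? (pvVal field p.2) != some p.1)).map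
      (fun p => pvMsg field label (pvVal field p.2) p.1) = pvRef field label its i0 prev := by
  induction its generalizing i0 prev with
  | nil => simp [pvRef]
  | cons it its ih =>
    rw [PySem.List.enumerate_cons]
    have h0 := H 0 (by simp)
    simp only [List.getElem_cons_zero, List.take_zero, List.map_nil, List.append_nil,
      Nat.cast_zero, add_zero] at h0
    have hrest : ((PySem.List.enumerate its (i0 + 1)).filter
        (fun p => F.get? (pvVal field p.2) != some p.1)).map
      (fun p => pvMsg field label (pvVal field p.2) p.1)
        = pvRef field label its (i0 + 1) (prev ++ [pvVal field it]) := by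
      apply ih
      intro k hk
      have hH := H (k + 1) (by simpa using Nat.succ_lt_succ hk)
      simp only [List.getElem_cons_succ, List.take_succ_cons, List.map_cons] at hH
      have hcast : (i0 + ((k : Nat) + 1 : Nat) : Int) = (i0 + 1) + (k : Nat) := by push_cast; ring
      rw [hcast] at hH
      rw [hH]
      simp
    by_cases h : pvVal field it ∈ prev
    · have : (F.get? (pvVal field it) != some i0) = true := by
        simp only [bne_iff_ne]; exact h0.mpr h
      simp only [List.filter_cons, this, if_pos, List.map_cons, hrest]
      simp [pvRef, h]
    · have : (F.get? (pvVal field it) != some i0) = false := by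
        simp only [bne_eq_false_iff_eq]
        by_contra hne
        exact h (h0.mp hne)
      simp only [List.filter_cons, this, if_neg (by simp : ¬(false = true))]
      rw [hrest]
      simp [pvRef, h]

lemma pvA_eq (items : List (List (String × String))) (field label : String) :
    check_unique_segment_ids items field label = pvRef field label items 0 [] := by
  have := pvA_aux field label items 0 [] []
  simpa [check_unique_segment_ids, PySem.Set.empty, PySem.Set.ofList] using this

lemma pvB_eq (items : List (List (String × String))) (field label : String) :
    check_unique_segment_ids_alt items field label = pvRef field label items 0 [] := by
  unfold check_unique_segment_ids_alt
  apply pvB_aux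
  intro k hk
  rw [pvD_aux]
  simp only [PySem.Dict.get?_empty, Option.none_or, List.nil_append]
  have hs := pvFidx_spec field items 0 k hk
  constructor
  · intro hne
    by_contra hmem
    exact hne (by rw [hs.mpr hmem])
  · intro hmem heq
    exact (hs.mp heq) hmem

-- ===== VERDICT (by name: the statement is the Claim_ definition above) =====
theorem check_unique_segment_ids_spec : Claim_equal_check_unique_segment_ids := by
  intro items field label _
  unfold Spec_check_unique_segment_ids
  rw [pvA_eq, pvB_eq]
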